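-- pv_equiv track=rewrite | github.com/christineyws-beep/kinship-earth-mcp | tools/schema_snapshot.py | diff_schemas
-- ===== SOURCE A (Python) =====
-- def diff_schemas(
--     old: dict[str, str], new: dict[str, str]
-- ) -> dict[str, list[dict[str, str]]]:
--     """
--     Compare two field→type mappings.
--
--     Returns:
--         {
--             "added":   [{"field": "x", "type": "str"}],
--             "removed": [{"field": "y", "type": "int"}],
--             "changed": [{"field": "z", "old_type": "str", "new_type": "int"}],
--         }
--     """
--     old_fields = set(old.keys())
--     new_fields = set(new.keys())
--
--     added = [{"field": f, "type": new[f]} for f in sorted(new_fields - old_fields)]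
--     removed = [{"field": f, "type": old[f]} for f in sorted(old_fields - new_fields)]
--     changed = []
--     for f in sorted(old_fields & new_fields):
--         if old[f] != new[f]:
--             # null→anything is not a real change (field was previously unseen)
--             if old[f] == "null" or new[f] == "null":
--                 continue
--             changed.append({"field": f, "old_type": old[f], "new_type": new[f]})
--
--     return {"added": added, "removed": removed, "changed": changed}
-- ===== SOURCE B (Python) =====
-- def diff_schemas(old, new):
--     added, removed, changed = [], [], []
--     for f in sorted(set(old) | set(new)):
--         if f not in old:
--             added.append({"field": f, "type": new[f]})
--         elif f not in new:
--             removed.append({"field": f, "type": old[f]})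
--         elif old[f] != new[f] and old[f] != "null" and new[f] != "null":
--             changed.append({"field": f, "old_type": old[f], "new_type": new[f]})
--     return {"added": added, "removed": removed, "changed": changed}
-- ===== Notes on version B (the rewrite author's own statement) =====
-- stated objective: alternative
-- what changed: Instead of three separate set differences/intersections each sorted and scanned on its own, B sorts the union of all keys once and classifies every key into added/removed/changed in a single pass.
import Mathlib
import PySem

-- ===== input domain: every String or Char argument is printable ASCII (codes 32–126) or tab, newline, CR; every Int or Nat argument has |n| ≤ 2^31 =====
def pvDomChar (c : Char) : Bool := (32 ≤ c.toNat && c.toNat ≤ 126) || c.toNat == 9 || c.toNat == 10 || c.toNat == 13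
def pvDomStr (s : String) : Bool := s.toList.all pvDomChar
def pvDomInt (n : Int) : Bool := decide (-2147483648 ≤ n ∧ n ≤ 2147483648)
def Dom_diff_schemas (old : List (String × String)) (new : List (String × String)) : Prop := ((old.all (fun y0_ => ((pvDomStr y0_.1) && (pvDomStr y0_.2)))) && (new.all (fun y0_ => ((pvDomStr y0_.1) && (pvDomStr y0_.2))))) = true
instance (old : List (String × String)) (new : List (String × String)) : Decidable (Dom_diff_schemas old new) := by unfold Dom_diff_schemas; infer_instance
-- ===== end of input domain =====

-- B sorts the union of all keys once and classifies each key into added/removed/changed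
-- in a single pass, instead of A's three sorted set differences/intersections each scanned separately.

-- dict lookup d[f] (first match; every use below has the key present, so the default is never returned)
def pvLookup (d : List (String × String)) (k : String) : String :=
  ((d.find? (fun p => p.1 == k)).map Prod.snd).getD ""

-- ===== PORT A =====
def diff_schemas (old : List (String × String)) (new : List (String × String)) : List (String × List (List (String × String))) :=
  let oldFields : PySem.Set String := PySem.Set.ofList (old.map Prod.fst)
  let newFields : PySem.Set String := PySem.Set.ofList (new.map Prod.fst)
  let added := (PySem.List.sorted (PySem.Set.diff newFields oldFields) (fun x => x) false).map
      (fun f => [("field", f), ("type", pvLookup new f)])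
  let removed := (PySem.List.sorted (PySem.Set.diff oldFields newFields) (fun x => x) false).map
      (fun f => [("field", f), ("type", pvLookup old f)])
  let changed := (PySem.List.sorted (PySem.Set.inter oldFields newFields) (fun x => x) false).foldl
      (fun acc f =>
        if pvLookup old f ≠ pvLookup new f then
          if pvLookup old f == "null" || pvLookup new f == "null" then acc
          else acc ++ [[("field", f), ("old_type", pvLookup old f), ("new_type", pvLookup new f)]]
        else acc) []
  [("added", added), ("removed", removed), ("changed", changed)]

-- ===== PORT B =====
def diff_schemas_alt (old : List (String × String)) (new : List (String × String)) : List (String × List (List (String × String))) :=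
  let keys := PySem.List.sorted (PySem.Set.union (PySem.Set.ofList (old.map Prod.fst)) (new.map Prod.fst)) (fun x => x) false
  let res := keys.foldl
      (fun (acc : List (List (String × String)) × List (List (String × String)) × List (List (String × String))) f =>
        if !(old.map Prod.fst).contains f then
          (acc.1 ++ [[("field", f), ("type", pvLookup new f)]], acc.2.1, acc.2.2)
        else if !(new.map Prod.fst).contains f then
          (acc.1, acc.2.1 ++ [[("field", f), ("type", pvLookup old f)]], acc.2.2)
        else if pvLookup old f ≠ pvLookup new f ∧ pvLookup old f ≠ "null" ∧ pvLookup new f ≠ "null" then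
          (acc.1, acc.2.1, acc.2.2 ++ [[("field", f), ("old_type", pvLookup old f), ("new_type", pvLookup new f)]])
        else acc)
      ([], [], [])
  [("added", res.1), ("removed", res.2.1), ("changed", res.2.2)]

-- ===== PRECONDITION & SPEC =====
def Spec_diff_schemas (old : List (String × String)) (new : List (String × String)) (out : List (String × List (List (String × String)))) : Prop := out = diff_schemas_alt old new
instance (old : List (String × String)) (new : List (String × String)) (out : List (String × List (List (String × String)))) : Decidable (Spec_diff_schemas old new out) := by unfold Spec_diff_schemas; infer_instance

-- ===== CLAIM (what is proved, stated in full; the proofs are below) =====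
def Claim_equal_diff_schemas : Prop := ∀ (old : List (String × String)) (new : List (String × String)), Dom_diff_schemas old new → Spec_diff_schemas old new (diff_schemas old new)

-- ===== LEMMAS AND PROOFS =====

-- B's single classifying pass splits into three independent filter-maps.
theorem foldB_eq (old new : List (String × String)) (u : List String)
    (a r c : List (List (String × String))) :
    u.foldl
      (fun (acc : List (List (String × String)) × List (List (String × String)) × List (List (String × String))) f =>
        if !(old.map Prod.fst).contains f then
          (acc.1 ++ [[("field", f), ("type", pvLookup new f)]], acc.2.1, acc.2.2)
        else if !(new.map Prod.fst).contains f then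
          (acc.1, acc.2.1 ++ [[("field", f), ("type", pvLookup old f)]], acc.2.2)
        else if pvLookup old f ≠ pvLookup new f ∧ pvLookup old f ≠ "null" ∧ pvLookup new f ≠ "null" then
          (acc.1, acc.2.1, acc.2.2 ++ [[("field", f), ("old_type", pvLookup old f), ("new_type", pvLookup new f)]])
        else acc)
      (a, r, c)
    = (a ++ (u.filter (fun f => !(old.map Prod.fst).contains f)).map
          (fun f => [("field", f), ("type", pvLookup new f)]),
       r ++ (u.filter (fun f => (old.map Prod.fst).contains f && !(new.map Prod.fst).contains f)).map
          (fun f => [("field", f), ("type", pvLookup old f)]),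
       c ++ (u.filter (fun f => (old.map Prod.fst).contains f && (new.map Prod.fst).contains f &&
              decide (pvLookup old f ≠ pvLookup new f ∧ pvLookup old f ≠ "null" ∧ pvLookup new f ≠ "null"))).map
          (fun f => [("field", f), ("old_type", pvLookup old f), ("new_type", pvLookup new f)])) := by
  induction u generalizing a r c with
  | nil => simp
  | cons f t ih =>
    simp only [List.foldl_cons, List.filter_cons]
    by_cases ho : f ∈ old.map Prod.fst
    · by_cases hn : f ∈ new.map Prod.fst
      · by_cases hq : pvLookup old f ≠ pvLookup new f ∧ pvLookup old f ≠ "null" ∧ pvLookup new f ≠ "null"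
        · simp [ho, hn, hq, ih, List.append_assoc]
        · simp [ho, hn, hq, ih]
      · simp [ho, hn, ih, List.append_assoc]
    · simp [ho, ih, List.append_assoc]

-- a strictly increasing list with the members of X is sorted(X)
theorem sorted_eq_filter_sorted (X Y : List String) (p : String → Bool)
    (hX : X.Nodup) (hY : Y.Nodup)
    (hmem : ∀ x, x ∈ X ↔ (x ∈ Y ∧ p x = true)) :
    PySem.List.sorted X (fun x => x) false = (PySem.List.sorted Y (fun x => x) false).filter p := by
  apply PySem.List.sorted_eq_of_perm_of_pairwise_lt
  · -- Perm
    have h1 : ((PySem.List.sorted Y (fun x => x) false).filter p).Nodup :=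
      ((PySem.List.sorted_perm Y (fun x => x) false).nodup_iff.mpr hY).filter p
    rw [List.perm_ext_iff_of_nodup h1 hX]
    intro x
    simp only [List.mem_filter, PySem.List.mem_sorted, hmem]
  · -- Pairwise (<)
    have hle : ((PySem.List.sorted Y (fun x => x) false)).Pairwise (fun a b => a ≤ b) :=
      PySem.List.sorted_pairwise Y (fun x => x)
    have hne : ((PySem.List.sorted Y (fun x => x) false)).Nodup :=
      (PySem.List.sorted_perm Y (fun x => x) false).nodup_iff.mpr hY
    have hlt : ((PySem.List.sorted Y (fun x => x) false)).Pairwise (fun a b => a < b) :=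
      (hle.and hne).imp (fun h => lt_of_le_of_ne h.1 h.2)
    exact List.Pairwise.sublist List.filter_sublist hlt

-- ===== VERDICT (by name: the statement is the Claim_ definition above) =====

theorem diff_schemas_spec : Claim_equal_diff_schemas := by
  intro old new _
  unfold Spec_diff_schemas
  simp only [diff_schemas, diff_schemas_alt]
  rw [foldB_eq]
  set oldK : PySem.Set String := PySem.Set.ofList (old.map Prod.fst) with hoK
  set newK : PySem.Set String := PySem.Set.ofList (new.map Prod.fst) with hnK
  have hU : PySem.Set.union oldK (new.map Prod.fst) = PySem.Set.union oldK newK := by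
    rw [hnK]
    simp [PySem.Set.union, PySem.Set.update_eq_append_filter, PySem.Set.ofList_ofList]
  have hnodO : oldK.Nodup := PySem.Set.nodup_ofList _
  have hnodN : newK.Nodup := PySem.Set.nodup_ofList _
  have hnodU : (PySem.Set.union oldK newK).Nodup := PySem.Set.nodup_union _ _ hnodO
  -- added
  have hadd : PySem.List.sorted (PySem.Set.diff newK oldK) (fun x => x) false
      = (PySem.List.sorted (PySem.Set.union oldK newK) (fun x => x) false).filter
          (fun f => !(old.map Prod.fst).contains f) := by
    apply sorted_eq_filter_sorted _ _ _ (PySem.Set.nodup_diff _ _ hnodN) hnodU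
    intro x
    simp [hoK, hnK, PySem.Set.mem_diff, PySem.Set.mem_union, PySem.Set.mem_ofList]
    tauto
  -- removed
  have hrem : PySem.List.sorted (PySem.Set.diff oldK newK) (fun x => x) false
      = (PySem.List.sorted (PySem.Set.union oldK newK) (fun x => x) false).filter
          (fun f => (old.map Prod.fst).contains f && !(new.map Prod.fst).contains f) := by
    apply sorted_eq_filter_sorted _ _ _ (PySem.Set.nodup_diff _ _ hnodO) hnodU
    intro x
    simp [hoK, hnK, PySem.Set.mem_diff, PySem.Set.mem_union, PySem.Set.mem_ofList]
    tauto
  -- changed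
  have hchg : PySem.List.sorted (PySem.Set.inter oldK newK) (fun x => x) false
      = (PySem.List.sorted (PySem.Set.union oldK newK) (fun x => x) false).filter
          (fun f => (old.map Prod.fst).contains f && (new.map Prod.fst).contains f) := by
    apply sorted_eq_filter_sorted _ _ _ (PySem.Set.nodup_inter _ _ hnodO) hnodU
    intro x
    simp [hoK, hnK, PySem.Set.mem_inter, PySem.Set.mem_union, PySem.Set.mem_ofList]
    tauto
  -- A's changed loop is a filter-map
  have hloop : ∀ (u : List String),
      u.foldl (fun (acc : List (List (String × String))) f =>
        if pvLookup old f ≠ pvLookup new f then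
          if pvLookup old f == "null" || pvLookup new f == "null" then acc
          else acc ++ [[("field", f), ("old_type", pvLookup old f), ("new_type", pvLookup new f)]]
        else acc) []
      = (u.filter (fun f => decide (pvLookup old f ≠ pvLookup new f ∧ pvLookup old f ≠ "null" ∧ pvLookup new f ≠ "null"))).map
          (fun f => [("field", f), ("old_type", pvLookup old f), ("new_type", pvLookup new f)]) := by
    intro u
    have hcongr := PySem.List.foldl_congr_mem' (l := u) (init := ([] : List (List (String × String))))
      (f := fun acc f =>
        if pvLookup old f ≠ pvLookup new f then
          if pvLookup old f == "null" || pvLookup new f == "null" then acc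
          else acc ++ [[("field", f), ("old_type", pvLookup old f), ("new_type", pvLookup new f)]]
        else acc)
      (g := fun acc f =>
        if decide (pvLookup old f ≠ pvLookup new f ∧ pvLookup old f ≠ "null" ∧ pvLookup new f ≠ "null") = true
        then acc ++ [[("field", f), ("old_type", pvLookup old f), ("new_type", pvLookup new f)]]
        else acc)
      (by
        intro x _ acc
        by_cases h1 : pvLookup old x = pvLookup new x
        · simp [h1]
        · by_cases h2 : pvLookup old x = "null"
          · simp [h2]
          · by_cases h3 : pvLookup new x = "null"
            · simp [h2, h3]
            · simp [h1, h2, h3])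
    rw [hcongr, PySem.List.foldl_append_if]
    simp
  rw [hU, hloop, hadd, hrem, hchg, List.filter_filter]
  simp only [List.nil_append, List.cons.injEq, Prod.mk.injEq, true_and, and_true]
  congr 1
  apply List.filter_congr
  intro x _
  simp [Bool.and_assoc, Bool.and_comm, Bool.and_left_comm]
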